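-- pv_equiv track=rewrite | github.com/ttforsd/cf | 1927d.py | process_arr
-- ===== SOURCE A (Python) =====
-- def process_arr(nums):
--     res = []
--     for i, n in enumerate(nums):
--         if not res or nums[res[-1]] != n:
--             res.append(i)
--         else:
--             res[-1] = i
--     return res
-- ===== SOURCE B (Python) =====
-- def process_arr(nums):
--     # Two-pointer run scan: for each maximal run of equal consecutive
--     # values, emit the index of its last element.
--     res = []
--     i = 0
--     n = len(nums)
--     while i < n:
--         j = i
--         while j + 1 < n and nums[j + 1] == nums[j]:
--             j += 1
--         res.append(j)
--         i = j + 1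
--     return res
-- ===== Notes on version B (the rewrite author's own statement) =====
-- stated objective: alternative
-- what changed: Replaces A's element-by-element append-or-overwrite of the result's last slot with a two-pointer scan that finds each maximal run of equal consecutive values and appends its last index once.
import Mathlib
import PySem

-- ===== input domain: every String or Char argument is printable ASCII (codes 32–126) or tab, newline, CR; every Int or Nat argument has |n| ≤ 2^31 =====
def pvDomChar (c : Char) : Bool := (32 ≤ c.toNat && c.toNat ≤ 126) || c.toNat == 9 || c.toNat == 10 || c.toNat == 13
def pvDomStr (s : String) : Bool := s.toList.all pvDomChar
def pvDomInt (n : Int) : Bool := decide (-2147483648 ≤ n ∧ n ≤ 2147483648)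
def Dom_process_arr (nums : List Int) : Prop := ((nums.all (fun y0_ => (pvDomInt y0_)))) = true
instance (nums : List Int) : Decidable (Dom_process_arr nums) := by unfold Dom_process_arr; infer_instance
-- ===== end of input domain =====

-- B replaces A's append-or-overwrite loop with a two-pointer scan over maximal runs (alternative decomposition, same O(n) cost).

-- ===== PORT A =====
-- one loop step: 'if not res or nums[res[-1]] != n: res.append(i) else: res[-1] = i'
def pvStepA (nums : List Int) (res : List Int) (p : Int × Int) : List Int :=
  match res.getLast? with
  | none => res ++ [p.1]                       -- 'not res' branch: append
  | some j =>
    if PySem.List.pyGet? nums j ≠ some p.2 then res ++ [p.1]   -- nums[res[-1]] != n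
    else res.dropLast ++ [p.1]                 -- res[-1] = i

def process_arr (nums : List Int) : List Int :=
  (PySem.List.enumerate nums 0).foldl (pvStepA nums) []

-- ===== PORT B =====
-- inner 'while j + 1 < n and nums[j+1] == nums[j]': number of further elements equal to x
def pvRunLen (x : Int) : List Int → Nat
  | [] => 0
  | y :: ys => if y = x then pvRunLen x ys + 1 else 0

-- outer 'while i < n': emit last index of the run starting here, jump past it
def pvScan : List Int → Int → List Int
  | [], _ => []
  | x :: xs, i =>
    let k := pvRunLen x xs
    (i + (k : Int)) :: pvScan (xs.drop k) (i + (k : Int) + 1)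
termination_by l => l.length
decreasing_by simp

def process_arr_alt (nums : List Int) : List Int := pvScan nums 0

-- ===== PRECONDITION & SPEC =====
def Spec_process_arr (nums : List Int) (out : List Int) : Prop := out = process_arr_alt nums
instance (nums : List Int) (out : List Int) : Decidable (Spec_process_arr nums out) := by unfold Spec_process_arr; infer_instance

-- ===== CLAIM (what is proved, stated in full; the proofs are below) =====
def Claim_equal_process_arr : Prop := ∀ (nums : List Int), Dom_process_arr nums → Spec_process_arr nums (process_arr nums)

-- ===== LEMMAS AND PROOFS =====

-- merging: when the next element repeats, the run end is found one step later
lemma pvScan_nil (i : Int) : pvScan [] i = [] := by rw [pvScan]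

lemma pvScan_cons (x : Int) (xs : List Int) (i : Int) :
    pvScan (x :: xs) i
      = (i + (pvRunLen x xs : Int)) :: pvScan (xs.drop (pvRunLen x xs)) (i + (pvRunLen x xs : Int) + 1) := by
  rw [pvScan]

lemma pvScan_merge (x : Int) (xs : List Int) (i : Int) :
    pvScan (x :: x :: xs) i = pvScan (x :: xs) (i + 1) := by
  rw [pvScan_cons x (x :: xs) i, pvScan_cons x xs (i + 1)]
  have hk : pvRunLen x (x :: xs) = pvRunLen x xs + 1 := by simp [pvRunLen]
  rw [hk]
  push_cast
  simp only [List.drop_succ_cons]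
  have h1 : i + ((pvRunLen x xs : Int) + 1) = i + 1 + (pvRunLen x xs : Int) := by ring
  rw [h1]

lemma pvScan_single (x : Int) (xs : List Int) (i : Int)
    (h : xs.head? ≠ some x) :
    pvScan (x :: xs) i = i :: pvScan xs (i + 1) := by
  have hk : pvRunLen x xs = 0 := by
    cases xs with
    | nil => rfl
    | cons y ys =>
      simp only [List.head?] at h
      simp [pvRunLen, show ¬ y = x from fun hy => h (congrArg some hy)]
  rw [pvScan_cons, hk]
  simp

-- main invariant of A's fold over the remaining suffix
lemma pvFoldA (nums : List Int) :
    ∀ (suf : List Int) (j : Nat) (acc : List Int) (p : Int),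
    acc.getLast? = some ((j : Int) - 1) →
    nums.drop j = suf →
    PySem.List.pyGet? nums ((j : Int) - 1) = some p →
    (PySem.List.enumerate suf (j : Int)).foldl (pvStepA nums) acc
      = (if suf.head? = some p then acc.dropLast else acc) ++ pvScan suf (j : Int) := by
  intro suf
  induction suf with
  | nil => intro j acc p _ _ _; simp [pvScan_nil, PySem.List.enumerate]
  | cons n rest ih =>
    intro j acc p hlast hdrop hget
    have hnj : nums[j]? = some n := by
      have h0 : (List.drop j nums)[0]? = nums[j + 0]? := List.getElem?_drop
      rw [hdrop] at h0; simpa using h0.symm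
    have hdrop' : nums.drop (j + 1) = rest := by
      have : nums.drop (j + 1) = (nums.drop j).drop 1 := by
        rw [List.drop_drop]
      rw [this, hdrop]; rfl
    have hget' : PySem.List.pyGet? nums ((((j + 1 : Nat)) : Int) - 1) = some n := by
      push_cast
      simpa [PySem.List.pyGet?_natCast] using hnj
    -- the first step of the fold
    have hstep : pvStepA nums acc ((j : Int), n)
        = (if n = p then acc.dropLast else acc) ++ [(j : Int)] := by
      simp only [pvStepA, hlast, hget]
      by_cases hnp : n = p
      · simp [hnp]
      · simp only [Ne.symm hnp, ne_eq, Option.some.injEq, not_false_eq_true, if_true, if_neg hnp]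
    have hacc' : ((if n = p then acc.dropLast else acc) ++ [(j : Int)]).getLast?
        = some (((j + 1 : Nat) : Int) - 1) := by
      push_cast; simp
    have ihres := ih (j + 1) _ n hacc' hdrop' hget'
    have henum : PySem.List.enumerate (n :: rest) (j : Int)
        = ((j : Int), n) :: PySem.List.enumerate rest (((j + 1 : Nat) : Int)) := by
      rw [PySem.List.enumerate_cons]; push_cast; ring_nf
    rw [henum, List.foldl_cons, hstep, ihres]
    by_cases hr : rest.head? = some n
    · -- run continues: rest = n :: rest'
      cases rest with
      | nil => simp at hr
      | cons y ys =>
        simp only [List.head?_cons, Option.some.injEq] at hr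
        subst hr
        rw [if_pos (by simp), List.dropLast_concat, pvScan_merge]
        have : ((j : Int)) + 1 = (((j + 1 : Nat)) : Int) := by push_cast; ring
        rw [this]
        simp
    · rw [if_neg hr, pvScan_single n rest (j : Int) hr]
      have : ((j : Int)) + 1 = (((j + 1 : Nat)) : Int) := by push_cast; ring
      rw [this]
      by_cases hnp : n = p
      · simp [hnp]
      · simp [hnp]

-- ===== VERDICT (by name: the statement is the Claim_ definition above) =====
theorem process_arr_spec : Claim_equal_process_arr := by
  intro nums _
  unfold Spec_process_arr process_arr process_arr_alt
  cases hn : nums with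
  | nil => simp [PySem.List.enumerate, pvScan_nil]
  | cons m tail =>
    have henum : PySem.List.enumerate (m :: tail) (0 : Int)
        = ((0 : Int), m) :: PySem.List.enumerate tail ((1 : Nat) : Int) := by
      rw [PySem.List.enumerate_cons]; norm_num
    have hstep0 : pvStepA (m :: tail) [] ((0 : Int), m) = [(0 : Int)] := by
      simp [pvStepA]
    have hget : PySem.List.pyGet? (m :: tail) (((1 : Nat) : Int) - 1) = some m := by
      norm_num [PySem.List.pyGet?_zero_cons]
    have hlast : ([(0 : Int)]).getLast? = some (((1 : Nat) : Int) - 1) := by norm_num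
    have hdrop : (m :: tail).drop 1 = tail := rfl
    rw [henum, List.foldl_cons, hstep0,
      pvFoldA (m :: tail) tail 1 [(0 : Int)] m hlast hdrop hget]
    by_cases hr : tail.head? = some m
    · cases tail with
      | nil => simp at hr
      | cons y ys =>
        simp only [List.head?, Option.some.injEq] at hr
        subst hr
        rw [pvScan_merge]
        norm_num
    · rw [if_neg hr, pvScan_single m tail 0 hr]
      norm_num
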